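-- pv_equiv track=rewrite | github.com/rising-entropy/Assignment-Archives | DAA/Assignment 7/prims.py | checkIfPointAlreadyExists
-- ===== SOURCE A (Python) =====
-- def checkIfPointAlreadyExists(theMST, thePoint):
--     theListOfPoints = []
--     for i in theMST:
--         theListOfPoints.append(i[0])
--         theListOfPoints.append(i[1])
--     theListOfPoints = list(set(theListOfPoints))
--     if thePoint in theListOfPoints:
--         return True
--     return False
-- ===== SOURCE B (Python) =====
-- def checkIfPointAlreadyExists(theMST, thePoint):
--     return any(thePoint == i[0] or thePoint == i[1] for i in theMST)
-- ===== Notes on version B (the rewrite author's own statement) =====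
-- stated objective: simpler
-- what changed: Replaced the build-vertex-list / dedupe-to-set / membership-test pipeline by a single early-exit any() scan over the edges; no intermediate list or set is materialized.
import Mathlib
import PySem

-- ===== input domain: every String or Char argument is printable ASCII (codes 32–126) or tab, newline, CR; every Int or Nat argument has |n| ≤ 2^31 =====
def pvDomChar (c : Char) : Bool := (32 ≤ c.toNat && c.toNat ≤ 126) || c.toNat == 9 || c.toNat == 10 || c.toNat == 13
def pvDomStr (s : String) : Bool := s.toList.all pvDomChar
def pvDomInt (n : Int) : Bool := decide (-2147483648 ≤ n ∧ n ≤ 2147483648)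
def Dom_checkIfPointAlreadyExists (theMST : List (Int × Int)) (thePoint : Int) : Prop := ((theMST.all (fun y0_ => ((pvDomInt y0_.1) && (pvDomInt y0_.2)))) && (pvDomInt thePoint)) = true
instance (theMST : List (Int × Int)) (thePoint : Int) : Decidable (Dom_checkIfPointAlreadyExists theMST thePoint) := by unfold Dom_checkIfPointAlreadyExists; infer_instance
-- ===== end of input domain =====

-- ===== PORT A =====
-- B replaces A's build-list/dedupe/membership pipeline with one early-exit scan (simpler, no intermediate structures).
def checkIfPointAlreadyExists (theMST : List (Int × Int)) (thePoint : Int) : Bool :=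
  let theListOfPoints : List Int := theMST.foldl (fun acc i => (acc ++ [i.1]) ++ [i.2]) []
  let theListOfPoints : PySem.Set Int := PySem.Set.ofList theListOfPoints
  if thePoint ∈ theListOfPoints then true else false

-- ===== PORT B =====
def checkIfPointAlreadyExists_alt (theMST : List (Int × Int)) (thePoint : Int) : Bool :=
  theMST.any (fun i => thePoint == i.1 || thePoint == i.2)

-- ===== PRECONDITION & SPEC =====
def Spec_checkIfPointAlreadyExists (theMST : List (Int × Int)) (thePoint : Int) (out : Bool) : Prop := out = checkIfPointAlreadyExists_alt theMST thePoint
instance (theMST : List (Int × Int)) (thePoint : Int) (out : Bool) : Decidable (Spec_checkIfPointAlreadyExists theMST thePoint out) := by unfold Spec_checkIfPointAlreadyExists; infer_instance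

-- ===== CLAIM (what is proved, stated in full; the proofs are below) =====
def Claim_equal_checkIfPointAlreadyExists : Prop := ∀ (theMST : List (Int × Int)) (thePoint : Int), Dom_checkIfPointAlreadyExists theMST thePoint → Spec_checkIfPointAlreadyExists theMST thePoint (checkIfPointAlreadyExists theMST thePoint)

-- ===== LEMMAS AND PROOFS =====

-- ===== VERDICT (by name: the statement is the Claim_ definition above) =====
theorem checkIfPointAlreadyExists_spec : Claim_equal_checkIfPointAlreadyExists := by
  intro theMST thePoint _
  unfold Spec_checkIfPointAlreadyExists checkIfPointAlreadyExists checkIfPointAlreadyExists_alt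
  simp only [Bool.if_true_left, Bool.or_false]
  rw [Bool.eq_iff_iff]
  simp [PySem.Set.mem_ofList, List.any_eq_true]
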